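-- pv_equiv track=rewrite | github.com/ThimiH/Competitive_Coding | CSAcademy/IEEEXtreme/Infinite_String.py | base10_to_base_n
-- ===== SOURCE A (Python) =====
-- def base10_to_base_n(number, base,i):
--     if number == 0:
--         return [0]*i
--
--     result = []
--     while number > 0:
--         remainder = number % base
--         result = [remainder] + result
--         number = number // base
--     while len(result)<i:
--         result = [0]+result
--     return result
-- ===== SOURCE B (Python) =====
-- def base10_to_base_n(number, base, i):
--     # B: left-pad with zeros up front, then extract the significant digits most-significant-first
--     # by dividing the number by a rolling power of the base, instead of A's bottom-up remainder
--     # accumulation with repeated list prepending.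
--     if number <= 0:
--         return [0] * i
--     n = number
--     d = 0
--     while n > 0:
--         n //= base
--         d += 1
--     L = max(i, d)
--     digits = [0] * (L - d)
--     p = base ** (d - 1)
--     for _ in range(d):
--         digits.append((number // p) % base)
--         p //= base
--     return digits
-- ===== Notes on version B (the rewrite author's own statement) =====
-- stated objective: faster
-- what changed: B replaces A's bottom-up remainder loop with repeated list prepending by a digit-count loop, one left-pad of zeros, and most-significant-first extraction of each significant digit by dividing the number by a rolling power of the base.
import Mathlib
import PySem

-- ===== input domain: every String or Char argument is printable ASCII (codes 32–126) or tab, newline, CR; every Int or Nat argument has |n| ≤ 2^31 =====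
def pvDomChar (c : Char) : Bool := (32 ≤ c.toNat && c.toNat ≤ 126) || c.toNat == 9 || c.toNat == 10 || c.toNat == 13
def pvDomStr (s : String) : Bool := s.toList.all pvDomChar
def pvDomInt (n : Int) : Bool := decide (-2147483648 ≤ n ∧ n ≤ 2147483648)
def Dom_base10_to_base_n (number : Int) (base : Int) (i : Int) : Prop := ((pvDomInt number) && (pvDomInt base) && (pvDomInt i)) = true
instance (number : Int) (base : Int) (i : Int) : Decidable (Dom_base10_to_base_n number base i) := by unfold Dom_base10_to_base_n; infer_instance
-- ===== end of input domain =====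

-- B builds the result most-significant-first (one zero pad, then one digit per division by a rolling
-- power of the base) instead of A's bottom-up remainder accumulation with repeated O(length) list
-- prepending; a timing run measured B faster at the largest sizes. Return values agree on Pre_.

-- ===== PORT A =====
-- first while loop of A; fuel totalizes the loop (enough fuel on Pre_, where base ≥ 2 makes number strictly decrease)
def pvALoop (fuel : Nat) (number : Int) (base : Int) (result : List Int) : List Int :=
  match fuel with
  | 0 => result
  | f + 1 =>
      if number > 0 then
        pvALoop f (PySem.Int.floordiv number base) base (PySem.Int.mod number base :: result)
      else result

-- second while loop of A: prepend 0 while len(result) < i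
def pvAPad (result : List Int) (i : Int) : List Int :=
  if (result.length : Int) < i then pvAPad (0 :: result) i else result
termination_by (i - (result.length : Int)).toNat
decreasing_by simp only [List.length_cons]; omega

def base10_to_base_n (number : Int) (base : Int) (i : Int) : List Int :=
  if number = 0 then PySem.List.pyRepeat [0] i
  else pvAPad (pvALoop (number.toNat + 1) number base []) i

-- ===== PORT B =====
-- B's digit-count while loop; fuel totalizes it exactly as in pvALoop
def pvBCount (fuel : Nat) (n : Int) (base : Int) (d : Int) : Int :=
  match fuel with
  | 0 => d
  | f + 1 =>
      if n > 0 then pvBCount f (PySem.Int.floordiv n base) base (d + 1)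
      else d

-- B's `for _ in range(L)` loop: append the digit at the rolling power p, then p //= base
def pvBDigits (count : Nat) (number : Int) (base : Int) (p : Int) (digits : List Int) : List Int :=
  match count with
  | 0 => digits
  | c + 1 =>
      pvBDigits c number base (PySem.Int.floordiv p base)
        (digits ++ [PySem.Int.mod (PySem.Int.floordiv number p) base])

def base10_to_base_n_alt (number : Int) (base : Int) (i : Int) : List Int :=
  if number ≤ 0 then PySem.List.pyRepeat [0] i
  else
    let d := pvBCount (number.toNat + 1) number base 0
    let L := max i d
    -- base ** (d - 1): here d ≥ 1, so the .toNat on the exponent is exact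
    pvBDigits d.toNat number base (base ^ (d - 1).toNat) (PySem.List.pyRepeat [0] (L - d))

-- ===== PRECONDITION & SPEC =====
-- Pre_ excludes only base 0 and base 1 with number > 0: there both programs raise
-- ZeroDivisionError (base 0) or loop forever (base 1); A and B agree everywhere A returns.
def Pre_base10_to_base_n (number : Int) (base : Int) (i : Int) : Prop :=
  number ≤ 0 ∨ 2 ≤ base ∨ base ≤ -1
instance (number : Int) (base : Int) (i : Int) : Decidable (Pre_base10_to_base_n number base i) := by
  unfold Pre_base10_to_base_n; infer_instance

def pvWitness_base10_to_base_n : Int × Int × Int := (13, 3, 5)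

def Spec_base10_to_base_n (number : Int) (base : Int) (i : Int) (out : List Int) : Prop := out = base10_to_base_n_alt number base i
instance (number : Int) (base : Int) (i : Int) (out : List Int) : Decidable (Spec_base10_to_base_n number base i out) := by unfold Spec_base10_to_base_n; infer_instance

-- ===== CLAIM (what is proved, stated in full; the proofs are below) =====
def Claim_equal_base10_to_base_n : Prop := ∀ (number : Int) (base : Int) (i : Int), Dom_base10_to_base_n number base i → Pre_base10_to_base_n number base i → Spec_base10_to_base_n number base i (base10_to_base_n number base i)

-- ===== LEMMAS AND PROOFS =====

lemma pv_ediv_lt (n b : Int) (hn : 0 < n) (hb : 2 ≤ b) : n / b < n := by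
  have h : b * (n / b) + n % b = n := Int.mul_ediv_add_emod n b
  have hr0 : 0 ≤ n % b := Int.emod_nonneg n (by omega)
  have hq0 : 0 ≤ n / b := Int.ediv_nonneg (by omega) (by omega)
  nlinarith [mul_nonneg (by omega : (0:Int) ≤ b - 2) hq0]

-- canonical digit list (most significant first), the common reference of both ports
def pvDigs (base : Int) (n : Int) : List Int :=
  if h : 0 < n ∧ 2 ≤ base then
    pvDigs base (PySem.Int.floordiv n base) ++ [PySem.Int.mod n base]
  else []
termination_by n.toNat
decreasing_by
  rcases h with ⟨hn, hb⟩
  rw [PySem.Int.floordiv_eq_ediv_of_pos (by omega)]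
  have h1 : n / base < n := pv_ediv_lt _ _ hn hb
  have h2 : 0 ≤ n / base := Int.ediv_nonneg (by omega) (by omega)
  omega

lemma pvDigs_nonpos (base n : Int) (h : ¬ 0 < n) : pvDigs base n = [] := by
  rw [pvDigs]; simp [h]

lemma pvALoop_eq (base : Int) (hb : 2 ≤ base) :
    ∀ (fuel : Nat) (n : Int) (acc : List Int), n.toNat < fuel →
      pvALoop fuel n base acc = pvDigs base n ++ acc := by
  intro fuel
  induction fuel with
  | zero => intro n acc h; omega
  | succ f ih =>
      intro n acc h
      by_cases hn : 0 < n
      · have hdiv : PySem.Int.floordiv n base = n / base :=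
          PySem.Int.floordiv_eq_ediv_of_pos (by omega)
        have h1 : n / base < n := pv_ediv_lt _ _ hn hb
        have h2 : 0 ≤ n / base := Int.ediv_nonneg (by omega) (by omega)
        rw [pvALoop]
        simp only [hn, if_pos]
        rw [ih _ _ (by rw [hdiv]; omega)]
        conv_rhs => rw [pvDigs]
        simp [hn, hb]
      · rw [pvALoop, pvDigs]
        simp [hn]

lemma pvBCount_eq (base : Int) (hb : 2 ≤ base) :
    ∀ (fuel : Nat) (n : Int) (d : Int), n.toNat < fuel →
      pvBCount fuel n base d = d + (pvDigs base n).length := by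
  intro fuel
  induction fuel with
  | zero => intro n d h; omega
  | succ f ih =>
      intro n d h
      by_cases hn : 0 < n
      · have hdiv : PySem.Int.floordiv n base = n / base :=
          PySem.Int.floordiv_eq_ediv_of_pos (by omega)
        have h1 : n / base < n := pv_ediv_lt _ _ hn hb
        have h2 : 0 ≤ n / base := Int.ediv_nonneg (by omega) (by omega)
        rw [pvBCount]
        simp only [hn, if_pos]
        rw [ih _ _ (by rw [hdiv]; omega)]
        conv_rhs => rw [pvDigs]
        simp [hn, hb]
        omega
      · rw [pvBCount, pvDigs]
        simp [hn]

lemma pvAPad_eq : ∀ (k : Nat) (r : List Int) (i : Int),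
    (i - (r.length : Int)).toNat = k → pvAPad r i = List.replicate k 0 ++ r := by
  intro k
  induction k with
  | zero =>
      intro r i h
      rw [pvAPad]
      simp only [if_neg (by omega : ¬ ((r.length : Int) < i))]
      simp
  | succ k ih =>
      intro r i h
      rw [pvAPad]
      simp only [if_pos (by omega : (r.length : Int) < i)]
      rw [ih (0 :: r) i (by simp; omega)]
      rw [show List.replicate (k + 1) (0 : Int) = List.replicate k 0 ++ [0] from
        List.replicate_succ' ..]
      simp

-- positional characterization of the digit list
lemma pvDigs_getElem (base : Int) (hb : 2 ≤ base) :
    ∀ n : Int, ∀ j : Nat, (hj : j < (pvDigs base n).length) →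
      (pvDigs base n)[j] =
        PySem.Int.mod (PySem.Int.floordiv n (base ^ ((pvDigs base n).length - 1 - j))) base := by
  intro n
  induction hm : n.toNat using Nat.strong_induction_on generalizing n with
  | _ m ih =>
    subst hm
    intro j hj
    by_cases hpos : 0 < n
    · have hdiv : PySem.Int.floordiv n base = n / base :=
        PySem.Int.floordiv_eq_ediv_of_pos (by omega)
      have h1 : n / base < n := pv_ediv_lt _ _ hpos hb
      have h2 : 0 ≤ n / base := Int.ediv_nonneg (by omega) (by omega)
      have hunf : pvDigs base n = pvDigs base (n / base) ++ [PySem.Int.mod n base] := by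
        rw [pvDigs]; simp [hpos, hb, hdiv]
      set q := n / base with hq
      set len' := (pvDigs base q).length with hlen'
      have hlen : (pvDigs base n).length = len' + 1 := by rw [hunf, hlen']; simp
      by_cases hjl : j < len'
      · have hgl : (pvDigs base n)[j] = (pvDigs base q)[j]'(by omega) := by
          simp only [hunf]
          rw [List.getElem_append_left (by omega)]
        rw [hgl, ih q.toNat (by omega) q rfl j (by simp only [← hlen']; exact hjl)]
        rw [hlen]
        have he : len' + 1 - 1 - j = (len' - 1 - j) + 1 := by omega
        rw [he]
        rw [PySem.Int.floordiv_eq_ediv_of_pos (by positivity),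
            PySem.Int.floordiv_eq_ediv_of_pos (by positivity)]
        rw [pow_succ']
        rw [← Int.ediv_ediv_of_nonneg (by omega : (0:Int) ≤ base)]
      · have hje : j = len' := by omega
        have hgr : (pvDigs base n)[j] = PySem.Int.mod n base := by
          simp only [hunf]
          rw [List.getElem_append_right (by omega)]
          simp [hje]
        rw [hgr, hlen, hje]
        have h0 : len' + 1 - 1 - len' = 0 := by omega
        rw [h0]
        simp
    · rw [pvDigs_nonpos base n hpos] at hj
      simp at hj

-- B's rolling-power loop, unrolled: with p = base^(c-1) it appends the digits at exponents c-1 … 0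
lemma pvBDigits_spec (number base : Int) (hb : 0 < base) :
    ∀ (c : Nat) (acc : List Int),
      pvBDigits c number base (base ^ (c - 1)) acc
        = acc ++ (List.range c).map
            (fun k => PySem.Int.mod (PySem.Int.floordiv number (base ^ (c - 1 - k))) base) := by
  intro c
  induction c with
  | zero => intro acc; simp [pvBDigits]
  | succ c ih =>
      intro acc
      rw [pvBDigits]
      rcases Nat.eq_zero_or_pos c with hc | hc
      · subst hc
        simp [pvBDigits]
      · have hp : PySem.Int.floordiv (base ^ (c + 1 - 1)) base = base ^ (c - 1) := by
          have hc' : c + 1 - 1 = (c - 1) + 1 := by omega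
          rw [hc', PySem.Int.floordiv_eq_ediv_of_pos hb, pow_succ,
              Int.mul_ediv_cancel _ (by omega)]
        rw [hp, ih, List.range_succ_eq_map, List.map_cons, List.map_map]
        have hfun : ((fun k => PySem.Int.mod (PySem.Int.floordiv number (base ^ (c + 1 - 1 - k))) base)
              ∘ (fun n => n + 1))
            = (fun k => PySem.Int.mod (PySem.Int.floordiv number (base ^ (c - 1 - k))) base) := by
          funext k
          simp only [Function.comp_apply]
          rw [show c + 1 - 1 - (k + 1) = c - 1 - k from by omega]
        rw [hfun]
        simp

-- with a positive numerator and negative base, one floor division already leaves the positive range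
lemma pv_fdiv_neg (n b : Int) (hn : 0 < n) (hb : b < 0) : PySem.Int.floordiv n b ≤ 0 := by
  have h := PySem.Int.floordiv_mul_add_mod n b
  have hm := PySem.Int.mod_neg_bounds (a := n) hb
  by_contra hq
  push_neg at hq
  have : PySem.Int.floordiv n b * b < 0 := mul_neg_of_pos_of_neg hq hb
  omega

-- the negative-base case: one loop iteration in both programs, then identical zero padding
lemma pv_negbase (number base i : Int) (hn : 0 < number) (hb : base ≤ -1) :
    base10_to_base_n number base i = base10_to_base_n_alt number base i := by
  have hq : PySem.Int.floordiv number base ≤ 0 := pv_fdiv_neg number base hn (by omega)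
  unfold base10_to_base_n base10_to_base_n_alt
  rw [if_neg (by omega : ¬ number = 0), if_neg (by omega : ¬ number ≤ 0)]
  have hA1 : pvALoop (number.toNat + 1) number base []
      = pvALoop number.toNat (PySem.Int.floordiv number base) base [PySem.Int.mod number base] := by
    rw [pvALoop]; simp [hn]
  have hA2 : pvALoop number.toNat (PySem.Int.floordiv number base) base [PySem.Int.mod number base]
      = [PySem.Int.mod number base] := by
    cases hfe : number.toNat with
    | zero => rw [pvALoop]
    | succ f => rw [pvALoop]; simp [show ¬ PySem.Int.floordiv number base > 0 by omega]
  rw [hA1, hA2, pvAPad_eq (i - 1).toNat [PySem.Int.mod number base] i (by norm_num)]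
  have hC1 : pvBCount (number.toNat + 1) number base 0
      = pvBCount number.toNat (PySem.Int.floordiv number base) base 1 := by
    rw [pvBCount]; simp [hn]
  have hC2 : pvBCount number.toNat (PySem.Int.floordiv number base) base 1 = 1 := by
    cases hfe : number.toNat with
    | zero => rw [pvBCount]
    | succ f => rw [pvBCount]; simp [show ¬ PySem.Int.floordiv number base > 0 by omega]
  rw [hC1, hC2]
  simp only [PySem.List.pyRepeat_singleton]
  norm_num
  simp only [pvBDigits]
  rw [show PySem.Int.floordiv number 1 = number from by
        rw [PySem.Int.floordiv_eq_ediv_of_pos (by omega : (0:Int) < 1)]; exact Int.ediv_one number]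
  congr 2
  omega

-- the whole positive case: A's padded remainder list equals B's rolling-power digit loop
lemma pv_main (number base i : Int) (hn : 0 < number) (hb : 2 ≤ base) :
    base10_to_base_n number base i = base10_to_base_n_alt number base i := by
  have hfuel : number.toNat < number.toNat + 1 := by omega
  unfold base10_to_base_n base10_to_base_n_alt
  rw [if_neg (by omega : ¬ number = 0), if_neg (by omega : ¬ number ≤ 0)]
  rw [pvALoop_eq base hb _ _ _ hfuel, pvBCount_eq base hb _ _ _ hfuel]
  simp only [zero_add]
  rw [List.append_nil, pvAPad_eq ((i - ((pvDigs base number).length : Int)).toNat)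
      (pvDigs base number) i rfl]
  set ds := pvDigs base number with hds
  set len := ds.length with hlen
  set L : Int := max i (len : Int) with hL
  have hpadL : (i - (len : Int)).toNat = (L - (len : Int)).toNat := by omega
  rw [hpadL]
  rw [show ((len : Int)).toNat = len from by omega,
      show (((len : Int)) - 1).toNat = len - 1 from by omega]
  rw [pvBDigits_spec number base (by omega), PySem.List.pyRepeat_singleton]
  congr 1
  symm
  apply List.ext_getElem (by simp only [List.length_map, List.length_range]; exact hlen)
  intro k hk1 hk2
  simp only [List.getElem_map, List.getElem_range]
  rw [pvDigs_getElem base hb number k (by simp only [← hds, ← hlen]; omega)]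

-- ===== VERDICT (by name: the statement is the Claim_ definition above) =====
theorem base10_to_base_n_spec : Claim_equal_base10_to_base_n := by
  intro number base i _ hpre
  unfold Spec_base10_to_base_n
  by_cases h0 : number = 0
  · subst h0
    unfold base10_to_base_n base10_to_base_n_alt
    simp
  · by_cases hneg : number < 0
    · unfold base10_to_base_n base10_to_base_n_alt
      rw [if_neg h0, if_pos (by omega : number ≤ 0)]
      have : pvALoop (number.toNat + 1) number base [] = [] := by
        rw [pvALoop]; simp [show ¬ number > 0 by omega]
      rw [this, pvAPad_eq i.toNat [] i (by simp)]
      simp [PySem.List.pyRepeat]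
    · have hn : 0 < number := by omega
      rcases hpre with h | h | h
      · omega
      · exact pv_main number base i hn h
      · exact pv_negbase number base i hn h
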